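-- pv_equiv track=rewrite | github.com/ASSERT-KTH/Mokav | experiments/pynguin/c4b/single-return/generated_tests/src_263/9/src_263.py | func
-- ===== SOURCE A (Python) =====
-- def func(*args):
--
-- 	(last, res) = ((- 1), 0)
-- 	s = args[0]
-- 	for (i, c) in enumerate(s):
-- 	    if (c in 'AEIOUY'):
-- 	        res = max(res, (i - last))
-- 	        last = i
-- 	res = max(res, (len(s) - last))
-- 	return(res)
-- ===== SOURCE B (Python) =====
-- def func(*args):
--     s = args[0]
--     pieces = [s]
--     for v in 'AEIOUY':
--         pieces = [q for p in pieces for q in p.split(v)]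
--     return 1 + max(len(p) for p in pieces)
-- ===== Notes on version B (the rewrite author's own statement) =====
-- stated objective: alternative
-- what changed: Replaces A's indexed per-character scan carrying (last vowel position, running max gap) with splitting the string on each vowel letter and returning 1 + the length of the longest resulting fragment; no indices or gaps are ever computed.
import Mathlib
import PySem

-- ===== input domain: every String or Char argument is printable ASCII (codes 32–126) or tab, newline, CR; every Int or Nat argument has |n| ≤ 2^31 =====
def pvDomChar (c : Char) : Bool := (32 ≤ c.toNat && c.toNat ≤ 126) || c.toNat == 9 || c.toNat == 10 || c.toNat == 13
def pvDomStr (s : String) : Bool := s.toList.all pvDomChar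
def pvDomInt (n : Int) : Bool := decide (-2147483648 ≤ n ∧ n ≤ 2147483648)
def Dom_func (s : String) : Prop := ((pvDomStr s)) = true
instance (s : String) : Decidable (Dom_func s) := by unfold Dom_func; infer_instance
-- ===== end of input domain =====

-- B splits the string on each vowel letter and returns 1 + the longest fragment length;
-- A scans with indices carrying (last, res). Equal on every string.

-- ===== PORT A =====
-- A's loop: state (last, res); on a vowel at index i, res = max res (i - last), last = i;
-- finally res = max res (len s - last).
def func (s : String) : Int :=
  let st := (PySem.List.enumerate s.toList).foldl
    (fun (p : Int × Int) (ic : Int × Char) =>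
      if "AEIOUY".toList.contains ic.2 then (ic.1, max p.2 (ic.1 - p.1)) else p)
    (-1, 0)
  max st.2 (PySem.Str.len s - st.1)

-- ===== PORT B =====
-- B: pieces = [s]; for each vowel v, re-split every piece on v; answer = 1 + max fragment length.
def func_alt (s : String) : Int :=
  let pieces := "AEIOUY".toList.foldl
    (fun (ps : List (List Char)) (v : Char) =>
      ps.flatMap (fun p => PySem.Chars.splitOn p [v])) [s.toList]
  match pieces with
  | [] => 0   -- unreachable: split always returns at least one piece
  | p :: rest => 1 + rest.foldl (fun m q => max m ((q.length : Int))) ((p.length : Int))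

-- ===== PRECONDITION & SPEC =====
def Spec_func (s : String) (out : Int) : Prop := out = func_alt s
instance (s : String) (out : Int) : Decidable (Spec_func s out) := by unfold Spec_func; infer_instance

-- ===== CLAIM (what is proved, stated in full; the proofs are below) =====
def Claim_equal_func : Prop := ∀ (s : String), Dom_func s → Spec_func s (func s)

-- ===== LEMMAS AND PROOFS =====

-- prepend `pre` to the first piece ([pre] if there is none)
def pvConsHead (pre : List Char) : List (List Char) → List (List Char)
  | [] => [pre]
  | q :: qs => (pre ++ q) :: qs

-- reference splitter: split a char list at every char satisfying P
def pvSplitP (P : Char → Bool) : List Char → List (List Char)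
  | [] => [[]]
  | c :: rest => if P c then [] :: pvSplitP P rest else pvConsHead [c] (pvSplitP P rest)

lemma pvSplitP_ne_nil (P : Char → Bool) (l : List Char) : pvSplitP P l ≠ [] := by
  cases l with
  | nil => simp [pvSplitP]
  | cons c rest =>
    simp only [pvSplitP]
    split_ifs
    · simp
    · cases h : pvSplitP P rest <;> simp [pvConsHead]

lemma pvSplitP_congr (P Q : Char → Bool) (h : ∀ c, P c = Q c) (l : List Char) :
    pvSplitP P l = pvSplitP Q l := by
  induction l with
  | nil => rfl
  | cons c rest ih => simp only [pvSplitP, h, ih]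

lemma pvSplitP_false (l : List Char) : pvSplitP (fun _ => false) l = [l] := by
  induction l with
  | nil => rfl
  | cons c rest ih => simp [pvSplitP, ih, pvConsHead]

-- PySem's fuel-based splitOn on a single-char separator is pvSplitP
lemma pvGo_spec (v : Char) : ∀ (l : List Char) (fuel : Nat) (cur : List Char)
    (acc : List (List Char)), l.length ≤ fuel →
    PySem.Chars.splitOn.go [v] fuel l cur acc
      = acc.reverse ++ pvConsHead cur.reverse (pvSplitP (fun c => v == c) l) := by
  intro l
  induction l with
  | nil =>
    intro fuel cur acc _
    cases fuel <;> simp [PySem.Chars.splitOn.go, pvSplitP, pvConsHead]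
  | cons c rest ih =>
    intro fuel cur acc hf
    cases fuel with
    | zero => simp at hf
    | succ f =>
      have hf' : rest.length ≤ f := by simpa using hf
      cases h : (v == c) with
      | true =>
        have hpre : List.isPrefixOf [v] (c :: rest) = true := by
          simp [List.isPrefixOf]; exact eq_of_beq h
        simp only [PySem.Chars.splitOn.go, hpre, if_pos]
        have hdrop : List.drop ([v].length) (c :: rest) = rest := by simp
        rw [hdrop, ih f [] (cur.reverse :: acc) hf']
        simp only [pvSplitP, h, if_pos]
        cases hr : pvSplitP (fun c => v == c) rest with
        | nil => exact absurd hr (pvSplitP_ne_nil _ _)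
        | cons q qs => simp [pvConsHead]
      | false =>
        have hpre : List.isPrefixOf [v] (c :: rest) = false := by
          simp [List.isPrefixOf]
          intro hvc
          rw [hvc] at h
          simp at h
        simp only [PySem.Chars.splitOn.go, hpre, Bool.false_eq_true, if_neg,
          not_false_iff]
        rw [ih f (c :: cur) acc hf']
        simp only [pvSplitP, h, Bool.false_eq_true, if_neg, not_false_iff]
        cases hr : pvSplitP (fun c => v == c) rest with
        | nil => exact absurd hr (pvSplitP_ne_nil _ _)
        | cons q qs => simp [pvConsHead]

lemma pvSplitOn_single (l : List Char) (v : Char) :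
    PySem.Chars.splitOn l [v] = pvSplitP (fun c => v == c) l := by
  unfold PySem.Chars.splitOn
  rw [pvGo_spec v l (l.length + 1) [] [] (by omega)]
  cases hr : pvSplitP (fun c => v == c) l with
  | nil => exact absurd hr (pvSplitP_ne_nil _ _)
  | cons q qs => simp [pvConsHead]

-- splitting the pieces of a P-split on Q refines it to the (P ∨ Q)-split
lemma pvConsHead_append (pre : List Char) (A B : List (List Char)) (h : A ≠ []) :
    pvConsHead pre A ++ B = pvConsHead pre (A ++ B) := by
  cases A with
  | nil => exact absurd rfl h
  | cons q qs => simp [pvConsHead]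

-- splitting the pieces of a P-split on Q refines it to the (P ∨ Q)-split
lemma pvFlat_split (P Q : Char → Bool) : ∀ (l : List Char),
    (pvSplitP P l).flatMap (pvSplitP Q) = pvSplitP (fun c => P c || Q c) l := by
  intro l
  induction l with
  | nil => simp [pvSplitP]
  | cons c rest ih =>
    cases hP : P c with
    | true =>
      simp only [pvSplitP, hP, if_pos, Bool.true_or, List.flatMap_cons, ih]
      rfl
    | false =>
      cases hr : pvSplitP P rest with
      | nil => exact absurd hr (pvSplitP_ne_nil _ _)
      | cons q qs =>
        rw [hr] at ih
        simp only [List.flatMap_cons] at ih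
        have hL : pvSplitP P (c :: rest) = (c :: q) :: qs := by
          simp [pvSplitP, hP, hr, pvConsHead]
        rw [hL]
        simp only [List.flatMap_cons]
        have hR : pvSplitP (fun c => P c || Q c) (c :: rest)
            = if Q c then [] :: pvSplitP (fun c => P c || Q c) rest
              else pvConsHead [c] (pvSplitP (fun c => P c || Q c) rest) := by
          simp [pvSplitP, hP]
        rw [hR]
        cases hQ : Q c with
        | true =>
          simp only [pvSplitP, hQ, if_pos, List.cons_append, ih]
        | false =>
          simp only [pvSplitP, hQ, Bool.false_eq_true, if_neg, not_false_iff]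
          rw [pvConsHead_append _ _ _ (pvSplitP_ne_nil _ _), ih]

-- the fold over the vowel letters computes the split on "any vowel"
lemma pvFold_split : ∀ (vs : List Char) (P : Char → Bool) (l : List Char),
    vs.foldl (fun (ps : List (List Char)) (v : Char) =>
        ps.flatMap (fun p => PySem.Chars.splitOn p [v])) (pvSplitP P l)
      = pvSplitP (fun c => P c || vs.contains c) l := by
  intro vs
  induction vs with
  | nil =>
    intro P l
    simp only [List.foldl_nil]
    exact pvSplitP_congr _ _ (fun c => by simp) l
  | cons v vs ih =>
    intro P l
    simp only [List.foldl_cons]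
    have h1 : (pvSplitP P l).flatMap (fun p => PySem.Chars.splitOn p [v])
        = pvSplitP (fun c => P c || (v == c)) l := by
      rw [show (fun p => PySem.Chars.splitOn p [v]) = pvSplitP (fun c => v == c) from
        funext (fun p => pvSplitOn_single p v)]
      exact pvFlat_split P _ l
    rw [h1, ih]
    exact pvSplitP_congr _ _ (fun c => by
      by_cases h : v = c
      · subst h; simp
      · have h1 : (v == c) = false := by simpa [beq_iff_eq] using h
        have h3 : decide (c = v) = false := decide_eq_false (fun hh => h hh.symm)
        simp [h1, h3]) l

-- vowel test used by both sides
def pvV (c : Char) : Bool := "AEIOUY".toList.contains c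

-- max gap of l given that (current index - last vowel index) = d at the start
def pvG : List Char → Int → Int
  | [], d => d
  | c :: rest, d => if pvV c then max d (pvG rest 1) else pvG rest (d + 1)

lemma pvG_ge (l : List Char) : ∀ d : Int, d ≤ pvG l d := by
  induction l with
  | nil => intro d; simp [pvG]
  | cons c rest ih =>
    intro d
    simp only [pvG]
    split_ifs
    · exact le_max_left _ _
    · calc d ≤ d + 1 := by omega
        _ ≤ pvG rest (d + 1) := ih _

-- A's loop body, named for the lemmas
def pvStepA (p : Int × Int) (ic : Int × Char) : Int × Int :=
  if "AEIOUY".toList.contains ic.2 then (ic.1, max p.2 (ic.1 - p.1)) else p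

-- A's fold computes pvG
lemma pvFoldA_eq_G (l : List Char) : ∀ (k last res : Int),
    max ((PySem.List.enumerate l k).foldl pvStepA (last, res)).2
        ((k + l.length) - ((PySem.List.enumerate l k).foldl pvStepA (last, res)).1)
      = max res (pvG l (k - last)) := by
  induction l with
  | nil => intro k last res; simp [PySem.List.enumerate, pvG]
  | cons c rest ih =>
    intro k last res
    rw [PySem.List.enumerate_cons]
    have hlen : (k + ((c :: rest).length : Int)) = (k + 1) + (rest.length : Int) := by
      simp; ring
    rw [hlen]
    cases h : "AEIOUY".toList.contains c with
    | true =>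
      simp only [List.foldl_cons, pvStepA, h, if_pos]
      rw [ih (k + 1) k (max res (k - last))]
      simp only [pvG, pvV, h, if_pos, add_sub_cancel_left]
      rw [max_assoc]
    | false =>
      simp only [List.foldl_cons, pvStepA, h, Bool.false_eq_true, if_neg, not_false_iff]
      rw [ih (k + 1) last res]
      have h2 : k + 1 - last = (k - last) + 1 := by ring
      rw [h2]
      simp only [pvG, pvV, h, Bool.false_eq_true, if_neg, not_false_iff]

-- max over the pieces, first piece weighted by d, later pieces by 1 + length
def pvMaxPieces (d : Int) : List (List Char) → Int
  | [] => d
  | p :: ps => ps.foldl (fun m q => max m (1 + (q.length : Int))) (d + p.length)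

lemma pvFoldMax_shift (g : List Char → Int) :
    ∀ (L : List (List Char)) (a b : Int),
      L.foldl (fun m q => max m (g q)) (max a b)
        = max a (L.foldl (fun m q => max m (g q)) b) := by
  intro L
  induction L with
  | nil => intro a b; rfl
  | cons c rest ih =>
    intro a b
    simp only [List.foldl_cons]
    rw [max_assoc, ih]

lemma pvG_eq_pieces (l : List Char) : ∀ d : Int,
    pvG l d = pvMaxPieces d (pvSplitP pvV l) := by
  induction l with
  | nil => intro d; simp [pvG, pvSplitP, pvMaxPieces]
  | cons c rest ih =>
    intro d
    by_cases h : pvV c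
    · simp only [pvG, h, if_pos, pvSplitP]
      cases hr : pvSplitP pvV rest with
      | nil => exact absurd hr (pvSplitP_ne_nil _ _)
      | cons q qs =>
        simp only [pvMaxPieces, List.length_nil, Int.natCast_zero, add_zero,
          List.foldl_cons]
        rw [pvFoldMax_shift]
        rw [ih 1, hr]
        simp [pvMaxPieces]
    · simp only [pvG, h, Bool.false_eq_true, if_neg, not_false_iff, pvSplitP]
      cases hr : pvSplitP pvV rest with
      | nil => exact absurd hr (pvSplitP_ne_nil _ _)
      | cons q qs =>
        rw [ih (d + 1), hr]
        simp only [pvMaxPieces, pvConsHead, List.singleton_append, List.length_cons]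
        simp only [Nat.cast_add, Nat.cast_one]
        rw [show (d + ((q.length:Int) + 1)) = (d + 1) + (q.length:Int) from by ring]

lemma pvOnePlus (L : List (List Char)) : ∀ a : Int,
    1 + L.foldl (fun m q => max m ((q.length : Int))) a
      = L.foldl (fun m q => max m (1 + (q.length : Int))) (1 + a) := by
  induction L with
  | nil => intro a; rfl
  | cons q qs ih =>
    intro a
    simp only [List.foldl_cons]
    rw [ih, max_add_add_left]

-- ===== VERDICT (by name: the statement is the Claim_ definition above) =====
theorem func_spec : Claim_equal_func := by
  intro s _
  unfold Spec_func
  -- A side: func s = pvG s.toList 1 = pvMaxPieces 1 (pvSplitP pvV s.toList)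
  have hA : func s = max 0 (pvG s.toList 1) := by
    unfold func
    show max (((PySem.List.enumerate s.toList 0).foldl pvStepA (-1, 0)).2)
        (PySem.Str.len s - ((PySem.List.enumerate s.toList 0).foldl pvStepA (-1, 0)).1)
      = max 0 (pvG s.toList 1)
    have hlen : PySem.Str.len s = ((0:Int) + (s.toList.length : Int)) := by
      rw [PySem.Str.len_eq]; ring
    rw [hlen]
    have h01 : pvG s.toList 1 = pvG s.toList (0 - (-1)) := by norm_num
    rw [h01]
    exact pvFoldA_eq_G s.toList 0 (-1) 0
  rw [hA, max_eq_right (le_trans (by omega) (pvG_ge s.toList 1)),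
    pvG_eq_pieces s.toList 1]
  -- B side
  unfold func_alt
  have hB : "AEIOUY".toList.foldl
      (fun (ps : List (List Char)) (v : Char) =>
        ps.flatMap (fun p => PySem.Chars.splitOn p [v])) [s.toList]
      = pvSplitP pvV s.toList := by
    rw [← pvSplitP_false s.toList, pvFold_split]
    exact pvSplitP_congr _ _ (fun c => by simp [pvV]) s.toList
  simp only [hB]
  cases hr : pvSplitP pvV s.toList with
  | nil => exact absurd hr (pvSplitP_ne_nil _ _)
  | cons q qs =>
    simp only [pvMaxPieces]
    rw [pvOnePlus]
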